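-- pv_equiv track=rewrite | github.com/Arnottjwr/Mathematics | Graph Theory/Eulerian_functions.py | all_positive_degree_vertices_connected
-- ===== SOURCE A (Python) =====
-- from collections import deque
--
-- def all_positive_degree_vertices_connected(graph):
--     """
--     Checks to see if all vertices of positive degree are connected, using a Breath-first traversal.
--
--     :return: bool value depending if all vertices are connceted
--     """
--     pos_deg = [i for i in graph if len(list(graph[i])) > 0]  # Create a list of the positive degree vertices
--
--     u = pos_deg[0]                                   # Initialise data for breadth-traversal
--     queue = deque()
--     queue.append(u)
--     seen = set()
--     while queue:                                     # While there are still things in the queue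
--         current_vertex = queue.popleft()             # Get the first thing in the queue
--
--         if current_vertex not in seen:
--             seen.add(current_vertex)
--             queue.extend(graph[current_vertex])          # Add all of the neighbours of current_vertex to the end of the queue.
--
--     if len(seen) == len(pos_deg):                    #
--
--         return True
--     else:
--         return False
-- ===== SOURCE B (Python) =====
-- def all_positive_degree_vertices_connected(graph):
--     """
--     Checks whether all positive-degree vertices are connected, by saturating the
--     set reachable from the first positive-degree vertex (round-based closure,
--     no queue) and comparing its size with the number of positive-degree vertices.
--     """
--     pos_deg = [v for v in graph if graph[v]]
--     seen = {pos_deg[0]}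
--     for _ in range(len(graph)):
--         seen = seen | {w for v in seen for w in graph[v]}
--     return len(seen) == len(pos_deg)
-- ===== Notes on version B (the rewrite author's own statement) =====
-- stated objective: alternative
-- what changed: Replaced the deque-based BFS (pop one vertex, check seen, extend queue) by a round-based saturation: repeatedly union the seen set with all neighbours of seen vertices for len(graph) rounds, maintaining only the set and no queue.
-- outside the precondition, e.g. on all_positive_degree_vertices_connected({}): A raises IndexError, B raises IndexError
import Mathlib
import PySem

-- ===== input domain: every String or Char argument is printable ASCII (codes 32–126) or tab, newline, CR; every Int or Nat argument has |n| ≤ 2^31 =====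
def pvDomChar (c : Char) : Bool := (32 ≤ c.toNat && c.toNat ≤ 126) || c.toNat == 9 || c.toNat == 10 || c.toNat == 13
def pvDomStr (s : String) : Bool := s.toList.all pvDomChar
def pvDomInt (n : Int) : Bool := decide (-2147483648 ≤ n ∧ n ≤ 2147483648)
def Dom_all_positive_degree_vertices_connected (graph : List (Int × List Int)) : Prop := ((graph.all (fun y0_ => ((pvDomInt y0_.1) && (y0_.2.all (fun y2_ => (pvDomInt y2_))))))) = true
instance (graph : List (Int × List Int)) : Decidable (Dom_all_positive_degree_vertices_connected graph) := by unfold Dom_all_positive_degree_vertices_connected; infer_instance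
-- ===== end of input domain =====

-- B replaces A's deque-based BFS by a round-based saturation of the reachable set (no queue);
-- same return value on Pre_; not faster, an alternative decomposition.


-- ===== PORT A =====
-- the BFS while-loop of A: pop the front of the queue; if unseen, add to seen and enqueue its
-- neighbours (graph[current]; a missing key is Python's KeyError, excluded by Pre_ — the port
-- stops there with the current seen set, value unused under Pre_)
def pvBFS (d : PySem.Dict Int (List Int)) (queue : List Int) (seen : PySem.Set Int) : PySem.Set Int :=
  match queue with
  | [] => seen
  | current :: rest =>
    if current ∈ seen then pvBFS d rest seen
    else
      match hadj : PySem.Dict.get? d current with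
      | none => PySem.Set.add seen current
      | some adj => pvBFS d (rest ++ adj) (PySem.Set.add seen current)
termination_by ((d.keys.toFinset \ seen.toFinset).card, queue.length)
decreasing_by
  · exact Prod.Lex.right _ (by simp)
  · apply Prod.Lex.left
    have hk : current ∈ d.keys := by
      by_contra hnk
      rw [(PySem.Dict.get?_eq_none_iff_not_mem_keys d current).mpr hnk] at hadj; simp at hadj
    have hns : current ∉ seen := by assumption
    have : (PySem.Set.add seen current).toFinset = insert current seen.toFinset := by
      simp [PySem.Set.add, PySem.Set.contains, hns, List.toFinset_append]
    rw [this]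
    apply Finset.card_lt_card
    constructor
    · intro x hx
      simp only [Finset.mem_sdiff, Finset.mem_insert, List.mem_toFinset] at *
      tauto
    · intro hsub
      have : current ∈ d.keys.toFinset \ seen.toFinset := by
        simp [List.mem_toFinset, hk, hns]
      have := hsub this
      simp at this

def all_positive_degree_vertices_connected (graph : List (Int × List Int)) : Bool :=
  let d := PySem.Dict.ofList graph
  let pos_deg := d.keys.filter (fun i => decide (0 < (PySem.Dict.getD d i []).length))
  match pos_deg with
  | [] => false  -- Python: pos_deg[0] raises IndexError (excluded by Pre_)
  | u :: _ =>
    let seen := pvBFS d [u] PySem.Set.empty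
    if seen.length = pos_deg.length then true else false

-- ===== PORT B =====
-- one saturation round of B: seen = seen | {w for v in seen for w in graph[v]}
-- (inside Pre_ every v ∈ seen is a key, so graph[v] = getD d v [])
def pvExpand (d : PySem.Dict Int (List Int)) (seen : PySem.Set Int) : PySem.Set Int :=
  PySem.Set.union seen (PySem.Set.ofList (seen.flatMap (fun v => PySem.Dict.getD d v [])))

def all_positive_degree_vertices_connected_alt (graph : List (Int × List Int)) : Bool :=
  let d := PySem.Dict.ofList graph
  let pos_deg := d.keys.filter (fun v => !(PySem.Dict.getD d v []).isEmpty)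
  match pos_deg with
  | [] => false  -- Python: pos_deg[0] raises IndexError (excluded by Pre_)
  | u :: _ =>
    let seen := (List.range (PySem.Dict.size d)).foldl (fun s _ => pvExpand d s)
                  (PySem.Set.add PySem.Set.empty u)
    decide (PySem.Set.len seen = (pos_deg.length : Int))

-- ===== PRECONDITION & SPEC =====
-- helper for Pre_ (used by no port): the keys of the dict reachable from u, as a bounded
-- transitive closure over the key set (|keys| widening rounds always suffice)
def pvKStep (d : PySem.Dict Int (List Int)) (S : List Int) : List Int :=
  d.keys.filter (fun v => decide (v ∈ S ∨ ∃ x ∈ S, v ∈ PySem.Dict.getD d x []))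

def pvReachKeys (d : PySem.Dict Int (List Int)) (u : Int) : List Int :=
  (List.range d.keys.length).foldl (fun S _ => pvKStep d S)
    (d.keys.filter (fun v => decide (v = u)))

-- Pre_ holds on exactly the inputs where the Python A returns normally: some vertex must have
-- positive degree (otherwise pos_deg[0] raises IndexError), and every neighbour of a key
-- reachable from pos_deg[0] must itself be a key (otherwise the traversal reaches it and
-- graph[current] raises KeyError).
def Pre_all_positive_degree_vertices_connected (graph : List (Int × List Int)) : Prop :=
  (PySem.Dict.ofList graph).keys.filter
      (fun i => decide (0 < (PySem.Dict.getD (PySem.Dict.ofList graph) i []).length)) ≠ [] ∧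
  ∀ v ∈ pvReachKeys (PySem.Dict.ofList graph)
      (((PySem.Dict.ofList graph).keys.filter
        (fun i => decide (0 < (PySem.Dict.getD (PySem.Dict.ofList graph) i []).length))).headD 0),
    ∀ w ∈ PySem.Dict.getD (PySem.Dict.ofList graph) v [], w ∈ (PySem.Dict.ofList graph).keys
instance (graph : List (Int × List Int)) : Decidable (Pre_all_positive_degree_vertices_connected graph) := by unfold Pre_all_positive_degree_vertices_connected; infer_instance

def pvWitness_all_positive_degree_vertices_connected : (List (Int × List Int)) :=
  [(1, [2]), (2, [1]), (3, [])]

def Spec_all_positive_degree_vertices_connected (graph : List (Int × List Int)) (out : Bool) : Prop := out = all_positive_degree_vertices_connected_alt graph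
instance (graph : List (Int × List Int)) (out : Bool) : Decidable (Spec_all_positive_degree_vertices_connected graph out) := by unfold Spec_all_positive_degree_vertices_connected; infer_instance

-- ===== CLAIM (what is proved, stated in full; the proofs are below) =====
def Claim_equal_all_positive_degree_vertices_connected : Prop := ∀ (graph : List (Int × List Int)), Dom_all_positive_degree_vertices_connected graph → Pre_all_positive_degree_vertices_connected graph → Spec_all_positive_degree_vertices_connected graph (all_positive_degree_vertices_connected graph)

-- ===== LEMMAS AND PROOFS =====

-- reachability along 'b is a neighbour of a' (adjacency read as A and B read it: getD d v [])
def pvStep (d : PySem.Dict Int (List Int)) (a b : Int) : Prop :=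
  b ∈ PySem.Dict.getD d a []

theorem key_of_step (d : PySem.Dict Int (List Int)) (a b : Int) (h : pvStep d a b) :
    a ∈ d.keys := by
  by_contra hna
  have hc : d.contains a = false := by
    rcases hcc : d.contains a with _ | _
    · rfl
    · exact absurd ((PySem.Dict.contains_iff_mem_keys d a).mp hcc) hna
  rw [pvStep, PySem.Dict.getD_of_not_contains d [] hc] at h
  simp at h

-- ---- BFS (port A): unfolding equations ----

theorem pvBFS_nil (d : PySem.Dict Int (List Int)) (seen : PySem.Set Int) :
    pvBFS d [] seen = seen := by rw [pvBFS]

theorem pvBFS_cons_mem (d : PySem.Dict Int (List Int)) (current : Int) (rest : List Int)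
    (seen : PySem.Set Int) (h : current ∈ seen) :
    pvBFS d (current :: rest) seen = pvBFS d rest seen := by
  rw [pvBFS]; simp [h]

theorem pvBFS_cons_some (d : PySem.Dict Int (List Int)) (current : Int) (rest : List Int)
    (seen : PySem.Set Int) (adj : List Int) (h : current ∉ seen)
    (hget : PySem.Dict.get? d current = some adj) :
    pvBFS d (current :: rest) seen = pvBFS d (rest ++ adj) (seen.add current) := by
  rw [pvBFS]; simp only [h, if_false, if_neg, not_false_iff]
  split <;> simp_all

theorem pvBFS_cons_none (d : PySem.Dict Int (List Int)) (current : Int) (rest : List Int)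
    (seen : PySem.Set Int) (h : current ∉ seen)
    (hget : PySem.Dict.get? d current = none) :
    pvBFS d (current :: rest) seen = seen.add current := by
  rw [pvBFS]; simp only [h, if_false, if_neg, not_false_iff]
  split <;> simp_all

-- ---- BFS invariants (u is the start vertex, hreach says every reachable vertex is a key) ----

theorem bfs_nodup (d : PySem.Dict Int (List Int)) (queue : List Int) (seen : PySem.Set Int)
    (h : seen.Nodup) : (pvBFS d queue seen).Nodup := by
  induction queue, seen using pvBFS.induct d with
  | case1 seen => simpa [pvBFS_nil] using h
  | case2 seen current rest hmem ih => rw [pvBFS_cons_mem d _ _ _ hmem]; exact ih h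
  | case3 seen current rest hmem hget =>
      rw [pvBFS_cons_none d _ _ _ hmem hget]
      exact PySem.Set.nodup_add seen current h
  | case4 seen current rest hmem adj hget ih =>
      rw [pvBFS_cons_some d _ _ _ _ hmem hget]; exact ih (PySem.Set.nodup_add seen current h)

theorem bfs_lower (d : PySem.Dict Int (List Int)) (u : Int) (queue : List Int) (seen : PySem.Set Int)
    (hreach : ∀ v, Relation.ReflTransGen (pvStep d) u v → v ∈ d.keys)
    (hq : ∀ v ∈ queue, Relation.ReflTransGen (pvStep d) u v) :
    ∀ v, (v ∈ seen ∨ v ∈ queue) → v ∈ pvBFS d queue seen := by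
  induction queue, seen using pvBFS.induct d with
  | case1 seen => intro v hv; rw [pvBFS_nil]; rcases hv with h | h; exact h; simp at h
  | case2 seen current rest hmem ih =>
      intro v hv
      rw [pvBFS_cons_mem d _ _ _ hmem]
      refine ih (fun x hx => hq x (by simp [hx])) v ?_
      rcases hv with h | h
      · exact Or.inl h
      · rcases List.mem_cons.mp h with h | h
        · exact Or.inl (h ▸ hmem)
        · exact Or.inr h
  | case3 seen current rest hmem hget =>
      exfalso
      exact ((PySem.Dict.get?_eq_none_iff_not_mem_keys d current).mp hget)
        (hreach current (hq current (by simp)))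
  | case4 seen current rest hmem adj hget ih =>
      intro v hv
      have hadjD : PySem.Dict.getD d current [] = adj := PySem.Dict.getD_of_get?_eq_some d [] hget
      rw [pvBFS_cons_some d _ _ _ _ hmem hget]
      refine ih ?_ v ?_
      · intro x hx
        rcases List.mem_append.mp hx with h | h
        · exact hq x (by simp [h])
        · exact (hq current (by simp)).tail (by rw [pvStep, hadjD]; exact h)
      · rcases hv with h | h
        · exact Or.inl ((PySem.Set.mem_add seen current v).mpr (Or.inl h))
        · rcases List.mem_cons.mp h with h | h
          · exact Or.inl ((PySem.Set.mem_add seen current v).mpr (Or.inr h))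
          · exact Or.inr (List.mem_append.mpr (Or.inl h))

theorem bfs_upper (d : PySem.Dict Int (List Int)) (queue : List Int) (seen : PySem.Set Int)
    (P : Int → Prop)
    (hstep : ∀ a b, P a → pvStep d a b → P b)
    (hs : ∀ v ∈ seen, P v) (hq : ∀ v ∈ queue, P v) :
    ∀ v ∈ pvBFS d queue seen, P v := by
  induction queue, seen using pvBFS.induct d with
  | case1 seen => intro v hv; rw [pvBFS_nil] at hv; exact hs v hv
  | case2 seen current rest hmem ih =>
      intro v hv
      rw [pvBFS_cons_mem d _ _ _ hmem] at hv
      exact ih hs (fun x hx => hq x (by simp [hx])) v hv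
  | case3 seen current rest hmem hget =>
      intro v hv
      rw [pvBFS_cons_none d _ _ _ hmem hget] at hv
      rcases (PySem.Set.mem_add seen current v).mp hv with h | h
      · exact hs v h
      · exact h ▸ hq current (by simp)
  | case4 seen current rest hmem adj hget ih =>
      intro v hv
      have hadjD : PySem.Dict.getD d current [] = adj := PySem.Dict.getD_of_get?_eq_some d [] hget
      have hPc : P current := hq current (by simp)
      rw [pvBFS_cons_some d _ _ _ _ hmem hget] at hv
      refine ih ?_ ?_ v hv
      · intro x hx
        rcases (PySem.Set.mem_add seen current x).mp hx with h | h
        · exact hs x h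
        · exact h ▸ hPc
      · intro x hx
        rcases List.mem_append.mp hx with h | h
        · exact hq x (by simp [h])
        · exact hstep current x hPc (by rw [pvStep, hadjD]; exact h)

theorem bfs_closed (d : PySem.Dict Int (List Int)) (u : Int) (queue : List Int) (seen : PySem.Set Int)
    (hreach : ∀ v, Relation.ReflTransGen (pvStep d) u v → v ∈ d.keys)
    (hq : ∀ v ∈ queue, Relation.ReflTransGen (pvStep d) u v)
    (hinv : ∀ v ∈ seen, ∀ w ∈ PySem.Dict.getD d v [], w ∈ seen ∨ w ∈ queue) :
    ∀ v ∈ pvBFS d queue seen, ∀ w ∈ PySem.Dict.getD d v [], w ∈ pvBFS d queue seen := by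
  induction queue, seen using pvBFS.induct d with
  | case1 seen =>
      intro v hv w hw
      rw [pvBFS_nil] at *
      rcases hinv v hv w hw with h | h
      · exact h
      · simp at h
  | case2 seen current rest hmem ih =>
      intro v hv w hw
      rw [pvBFS_cons_mem d _ _ _ hmem] at *
      refine ih (fun x hx => hq x (by simp [hx])) ?_ v hv w hw
      intro x hx y hy
      rcases hinv x hx y hy with h | h
      · exact Or.inl h
      · rcases List.mem_cons.mp h with h | h
        · exact Or.inl (h ▸ hmem)
        · exact Or.inr h
  | case3 seen current rest hmem hget =>
      exact absurd (hreach current (hq current (by simp)))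
        ((PySem.Dict.get?_eq_none_iff_not_mem_keys d current).mp hget)
  | case4 seen current rest hmem adj hget ih =>
      intro v hv w hw
      have hadjD : PySem.Dict.getD d current [] = adj := PySem.Dict.getD_of_get?_eq_some d [] hget
      rw [pvBFS_cons_some d _ _ _ _ hmem hget] at *
      refine ih ?_ ?_ v hv w hw
      · intro x hx
        rcases List.mem_append.mp hx with h | h
        · exact hq x (by simp [h])
        · exact (hq current (by simp)).tail (by rw [pvStep, hadjD]; exact h)
      · intro x hx y hy
        rcases (PySem.Set.mem_add seen current x).mp hx with h | h
        · rcases hinv x h y hy with h' | h'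
          · exact Or.inl ((PySem.Set.mem_add seen current y).mpr (Or.inl h'))
          · rcases List.mem_cons.mp h' with h' | h'
            · exact Or.inl ((PySem.Set.mem_add seen current y).mpr (Or.inr h'))
            · exact Or.inr (List.mem_append.mpr (Or.inl h'))
        · subst h
          exact Or.inr (List.mem_append.mpr (Or.inr (hadjD ▸ hy)))

-- ---- generic bounded widening (covers both B's saturation and Pre_'s pvReachKeys) ----

def pvFold (F : PySem.Set Int → PySem.Set Int) (m : Nat) (s : PySem.Set Int) : PySem.Set Int :=
  (List.range m).foldl (fun s _ => F s) s

theorem pvFold_zero (F : PySem.Set Int → PySem.Set Int) (s : PySem.Set Int) :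
    pvFold F 0 s = s := rfl

theorem pvFold_succ (F : PySem.Set Int → PySem.Set Int) (m : Nat) (s : PySem.Set Int) :
    pvFold F (m + 1) s = F (pvFold F m s) := by
  simp [pvFold, List.range_succ]

theorem pvFold_inv (F : PySem.Set Int → PySem.Set Int) (Inv : PySem.Set Int → Prop)
    (hinvF : ∀ s, Inv s → Inv (F s)) (m : Nat) (s : PySem.Set Int) (hs : Inv s) :
    Inv (pvFold F m s) := by
  induction m with
  | zero => exact hs
  | succ m ih => rw [pvFold_succ]; exact hinvF _ ih

theorem pvFold_start (F : PySem.Set Int → PySem.Set Int) (Inv : PySem.Set Int → Prop)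
    (hinvF : ∀ s, Inv s → Inv (F s))
    (hmono : ∀ s, Inv s → ∀ v ∈ s, v ∈ F s)
    (m : Nat) (s : PySem.Set Int) (hs : Inv s) :
    ∀ v ∈ s, v ∈ pvFold F m s := by
  induction m with
  | zero => intro v hv; exact hv
  | succ m ih =>
      intro v hv
      rw [pvFold_succ]
      exact hmono _ (pvFold_inv F Inv hinvF m s hs) v (ih v hv)

-- if no widening round up to j is stable, the set has grown by at least j elements
theorem pvFold_grow (F : PySem.Set Int → PySem.Set Int) (Inv : PySem.Set Int → Prop)
    (hinvF : ∀ s, Inv s → Inv (F s))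
    (hmono : ∀ s, Inv s → ∀ v ∈ s, v ∈ F s)
    (s : PySem.Set Int) (hs : Inv s) (j : Nat)
    (h : ∀ i < j, ¬ (∀ v, v ∈ F (pvFold F i s) ↔ v ∈ pvFold F i s)) :
    s.toFinset.card + j ≤ (pvFold F j s).toFinset.card := by
  induction j with
  | zero => simp [pvFold_zero]
  | succ j ih =>
      have hIj : Inv (pvFold F j s) := pvFold_inv F Inv hinvF j s hs
      have hj := h j (by omega)
      push_neg at hj
      obtain ⟨v, hv⟩ := hj
      have hvE : v ∈ F (pvFold F j s) ∧ v ∉ pvFold F j s := by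
        rcases hv with ⟨hE, hN⟩ | ⟨hNE, hM⟩
        · exact ⟨hE, hN⟩
        · exact absurd (hmono _ hIj v hM) hNE
      have hsub : (pvFold F j s).toFinset ⊂ (pvFold F (j + 1) s).toFinset := by
        rw [pvFold_succ]
        constructor
        · intro x hx
          rw [List.mem_toFinset] at *
          exact hmono _ hIj x hx
        · intro hcon
          exact hvE.2 (List.mem_toFinset.mp (hcon (List.mem_toFinset.mpr hvE.1)))
      have := Finset.card_lt_card hsub
      have := ih (fun i hi => h i (by omega))
      omega

-- after |B| rounds the widening is a membership fixpoint
theorem pvFold_fix (F : PySem.Set Int → PySem.Set Int) (Inv : PySem.Set Int → Prop)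
    (B : List Int) (hBnd : B.Nodup)
    (hinvF : ∀ s, Inv s → Inv (F s))
    (hmono : ∀ s, Inv s → ∀ v ∈ s, v ∈ F s)
    (hcong : ∀ s t, (∀ v, v ∈ s ↔ v ∈ t) → ∀ v, v ∈ F s ↔ v ∈ F t)
    (hsub : ∀ s, Inv s → ∀ v ∈ s, v ∈ B)
    (s : PySem.Set Int) (hs : Inv s) (hne : s ≠ []) :
    ∀ v, v ∈ F (pvFold F B.length s) ↔ v ∈ pvFold F B.length s := by
  have hstab : ∃ i < B.length, (∀ v, v ∈ F (pvFold F i s) ↔ v ∈ pvFold F i s) := by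
    by_contra hno
    have hno' : ∀ i < B.length, ¬ (∀ v, v ∈ F (pvFold F i s) ↔ v ∈ pvFold F i s) := by
      intro i hi hiff
      exact hno ⟨i, hi, hiff⟩
    have hgrow := pvFold_grow F Inv hinvF hmono s hs B.length hno'
    have hcard1 : 1 ≤ s.toFinset.card := by
      rcases s with _ | ⟨a, s'⟩
      · exact absurd rfl hne
      · exact Finset.card_pos.mpr ⟨a, by simp⟩
    have hsubB : (pvFold F B.length s).toFinset ⊆ B.toFinset := by
      intro x hx
      exact List.mem_toFinset.mpr
        (hsub _ (pvFold_inv F Inv hinvF B.length s hs) x (List.mem_toFinset.mp hx))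
    have hB : B.toFinset.card = B.length := List.toFinset_card_of_nodup hBnd
    have := Finset.card_le_card hsubB
    omega
  obtain ⟨i, hiL, hfix⟩ := hstab
  have hiter : ∀ k, ∀ v, v ∈ pvFold F (i + k) s ↔ v ∈ pvFold F i s := by
    intro k
    induction k with
    | zero => intro v; rfl
    | succ k ih =>
        intro v
        have h1 : i + (k + 1) = (i + k) + 1 := by omega
        rw [h1, pvFold_succ]
        exact (hcong _ (pvFold F i s) ih v).trans (hfix v)
  have hLi : i + (B.length - i) = B.length := by omega
  intro v
  have hmemL : ∀ w, w ∈ pvFold F B.length s ↔ w ∈ pvFold F i s := by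
    intro w
    have := hiter (B.length - i) w
    rwa [hLi] at this
  exact ((hcong _ (pvFold F i s) hmemL v).trans (hfix v)).trans (hmemL v).symm

-- ---- B's saturation rounds ----

theorem mem_expand (d : PySem.Dict Int (List Int)) (s : PySem.Set Int) (v : Int) :
    v ∈ pvExpand d s ↔ v ∈ s ∨ ∃ x ∈ s, v ∈ PySem.Dict.getD d x [] := by
  simp [pvExpand, PySem.Set.mem_union, PySem.Set.mem_ofList, List.mem_flatMap]

theorem expand_congr (d : PySem.Dict Int (List Int)) (s t : PySem.Set Int)
    (h : ∀ v, v ∈ s ↔ v ∈ t) : ∀ v, v ∈ pvExpand d s ↔ v ∈ pvExpand d t := by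
  intro v
  rw [mem_expand, mem_expand]
  constructor <;> rintro (hv | ⟨x, hx, hvx⟩)
  · exact Or.inl ((h v).mp hv)
  · exact Or.inr ⟨x, (h x).mp hx, hvx⟩
  · exact Or.inl ((h v).mpr hv)
  · exact Or.inr ⟨x, (h x).mpr hx, hvx⟩

theorem subset_expand (d : PySem.Dict Int (List Int)) (s : PySem.Set Int) (v : Int)
    (h : v ∈ s) : v ∈ pvExpand d s := (mem_expand d s v).mpr (Or.inl h)

theorem expand_reach (d : PySem.Dict Int (List Int)) (u : Int) (s : PySem.Set Int)
    (hs : ∀ v ∈ s, Relation.ReflTransGen (pvStep d) u v) :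
    ∀ v ∈ pvExpand d s, Relation.ReflTransGen (pvStep d) u v := by
  intro v hv
  rcases (mem_expand d s v).mp hv with h | ⟨x, hx, hvx⟩
  · exact hs v h
  · exact (hs x hx).tail hvx

-- membership of B's saturated set = reachability from u
theorem sat_char (d : PySem.Dict Int (List Int)) (u : Int)
    (hndk : d.keys.Nodup)
    (hreach : ∀ v, Relation.ReflTransGen (pvStep d) u v → v ∈ d.keys) :
    ∀ v, v ∈ pvFold (pvExpand d) d.keys.length [u]
      ↔ Relation.ReflTransGen (pvStep d) u v := by
  have hInv : ∀ s, (∀ v ∈ s, Relation.ReflTransGen (pvStep d) u v) →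
      (∀ v ∈ pvExpand d s, Relation.ReflTransGen (pvStep d) u v) :=
    fun s hs => expand_reach d u s hs
  have hs0 : ∀ v ∈ ([u] : PySem.Set Int), Relation.ReflTransGen (pvStep d) u v := by
    intro v hv; simp at hv; subst hv; exact Relation.ReflTransGen.refl
  have hfix := pvFold_fix (pvExpand d)
    (fun s => ∀ v ∈ s, Relation.ReflTransGen (pvStep d) u v)
    d.keys hndk hInv (fun s _ v hv => subset_expand d s v hv) (expand_congr d)
    (fun s hs v hv => hreach v (hs v hv)) [u] hs0 (by simp)
  intro v
  constructor
  · intro hv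
    exact pvFold_inv (pvExpand d) _ hInv d.keys.length [u] hs0 v hv
  · intro hR
    induction hR with
    | refl =>
        exact pvFold_start (pvExpand d) _ hInv (fun s _ v hv => subset_expand d s v hv)
          d.keys.length [u] hs0 u (by simp)
    | @tail b c h1 h2 ih =>
        exact (hfix c).mp ((mem_expand d _ c).mpr (Or.inr ⟨b, ih, h2⟩))

theorem sat_nodup (d : PySem.Dict Int (List Int)) (m : Nat) (u : Int) :
    (pvFold (pvExpand d) m [u]).Nodup :=
  pvFold_inv (pvExpand d) List.Nodup (fun s hs => PySem.Set.nodup_union _ _ hs) m [u] (by simp)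

-- ---- Pre_'s bounded closure pvReachKeys ----

theorem mem_kstep (d : PySem.Dict Int (List Int)) (S : List Int) (v : Int) :
    v ∈ pvKStep d S ↔ v ∈ d.keys ∧ (v ∈ S ∨ ∃ x ∈ S, v ∈ PySem.Dict.getD d x []) := by
  simp [pvKStep, List.mem_filter]

theorem pvReachKeys_eq_fold (d : PySem.Dict Int (List Int)) (u : Int) :
    pvReachKeys d u
      = pvFold (pvKStep d) d.keys.length (d.keys.filter (fun v => decide (v = u))) := rfl

-- the invariant of the key-closure: all members are keys reachable from u
theorem kstep_inv (d : PySem.Dict Int (List Int)) (u : Int) (s : PySem.Set Int)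
    (hs : ∀ v ∈ s, v ∈ d.keys ∧ Relation.ReflTransGen (pvStep d) u v) :
    ∀ v ∈ pvKStep d s, v ∈ d.keys ∧ Relation.ReflTransGen (pvStep d) u v := by
  intro v hv
  rcases (mem_kstep d s v).mp hv with ⟨hk, hmem | ⟨x, hx, hvx⟩⟩
  · exact ⟨hk, (hs v hmem).2⟩
  · exact ⟨hk, ((hs x hx).2).tail hvx⟩

theorem reach_complete (d : PySem.Dict Int (List Int)) (u : Int)
    (hndk : d.keys.Nodup) (hu : u ∈ d.keys) :
    ∀ v, Relation.ReflTransGen (pvStep d) u v → v ∈ d.keys → v ∈ pvReachKeys d u := by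
  have hbase : ∀ v ∈ d.keys.filter (fun v => decide (v = u)),
      v ∈ d.keys ∧ Relation.ReflTransGen (pvStep d) u v := by
    intro v hv
    rw [List.mem_filter] at hv
    refine ⟨hv.1, ?_⟩
    have : v = u := by simpa using hv.2
    subst this
    exact Relation.ReflTransGen.refl
  have hmono : ∀ s, (∀ v ∈ s, v ∈ d.keys ∧ Relation.ReflTransGen (pvStep d) u v) →
      ∀ v ∈ s, v ∈ pvKStep d s := by
    intro s hs v hv
    exact (mem_kstep d s v).mpr ⟨(hs v hv).1, Or.inl hv⟩
  have hcong : ∀ s t, (∀ v, v ∈ s ↔ v ∈ t) → ∀ v, v ∈ pvKStep d s ↔ v ∈ pvKStep d t := by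
    intro s t h v
    rw [mem_kstep, mem_kstep]
    constructor <;> rintro ⟨hk, hm | ⟨x, hx, hvx⟩⟩
    · exact ⟨hk, Or.inl ((h v).mp hm)⟩
    · exact ⟨hk, Or.inr ⟨x, (h x).mp hx, hvx⟩⟩
    · exact ⟨hk, Or.inl ((h v).mpr hm)⟩
    · exact ⟨hk, Or.inr ⟨x, (h x).mpr hx, hvx⟩⟩
  have hne : d.keys.filter (fun v => decide (v = u)) ≠ [] := by
    intro hnil
    have : u ∈ d.keys.filter (fun v => decide (v = u)) := by
      rw [List.mem_filter]; exact ⟨hu, by simp⟩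
    rw [hnil] at this
    simp at this
  have hfix := pvFold_fix (pvKStep d)
    (fun s => ∀ v ∈ s, v ∈ d.keys ∧ Relation.ReflTransGen (pvStep d) u v)
    d.keys hndk (kstep_inv d u) hmono hcong (fun s hs v hv => (hs v hv).1)
    (d.keys.filter (fun v => decide (v = u))) hbase hne
  intro v hR
  induction hR with
  | refl =>
      intro _
      rw [pvReachKeys_eq_fold]
      refine pvFold_start (pvKStep d) _ (kstep_inv d u) hmono d.keys.length _ hbase u ?_
      rw [List.mem_filter]; exact ⟨hu, by simp⟩
  | @tail b c h1 h2 ih =>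
      intro hck
      have hbk : b ∈ d.keys := key_of_step d b c h2
      have hb := ih hbk
      rw [pvReachKeys_eq_fold] at hb ⊢
      exact (hfix c).mp ((mem_kstep d _ c).mpr ⟨hck, Or.inr ⟨b, hb, h2⟩⟩)

-- Pre_'s second conjunct implies that every vertex reachable from u is a key
theorem pre2_reach (d : PySem.Dict Int (List Int)) (u : Int)
    (hndk : d.keys.Nodup) (hu : u ∈ d.keys)
    (hpre2 : ∀ v ∈ pvReachKeys d u, ∀ w ∈ PySem.Dict.getD d v [], w ∈ d.keys) :
    ∀ v, Relation.ReflTransGen (pvStep d) u v → v ∈ d.keys := by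
  intro v hR
  induction hR with
  | refl => exact hu
  | @tail b c h1 h2 ih => exact hpre2 b (reach_complete d u hndk hu b h1 ih) c h2

-- membership of A's BFS seen set = reachability from u
theorem bfs_char (d : PySem.Dict Int (List Int)) (u : Int)
    (hreach : ∀ v, Relation.ReflTransGen (pvStep d) u v → v ∈ d.keys) :
    ∀ v, v ∈ pvBFS d [u] PySem.Set.empty ↔ Relation.ReflTransGen (pvStep d) u v := by
  intro v
  constructor
  · refine bfs_upper d [u] PySem.Set.empty (fun x => Relation.ReflTransGen (pvStep d) u x)
      (fun a b ha hab => ha.tail hab) (by intro x hx; simp [PySem.Set.empty] at hx) ?_ v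
    intro x hx
    simp at hx
    subst hx
    exact Relation.ReflTransGen.refl
  · intro hR
    induction hR with
    | refl =>
        exact bfs_lower d u [u] PySem.Set.empty hreach
          (by intro x hx; simp at hx; subst hx; exact Relation.ReflTransGen.refl)
          u (Or.inr (by simp))
    | @tail b c h1 h2 ih =>
        exact bfs_closed d u [u] PySem.Set.empty hreach
          (by intro x hx; simp at hx; subst hx; exact Relation.ReflTransGen.refl)
          (by intro x hx; simp [PySem.Set.empty] at hx) b ih c h2

-- ===== VERDICT (by name: the statement is the Claim_ definition above) =====
theorem all_positive_degree_vertices_connected_spec : Claim_equal_all_positive_degree_vertices_connected := by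
  intro graph _ hpre
  unfold Spec_all_positive_degree_vertices_connected
  unfold Pre_all_positive_degree_vertices_connected at hpre
  obtain ⟨hne, hpre2⟩ := hpre
  simp only [all_positive_degree_vertices_connected, all_positive_degree_vertices_connected_alt]
  set d := PySem.Dict.ofList graph with hd
  have hfilters : d.keys.filter (fun i => decide (0 < (PySem.Dict.getD d i []).length))
      = d.keys.filter (fun v => !(PySem.Dict.getD d v []).isEmpty) := by
    refine List.filter_congr ?_
    intro i _
    cases PySem.Dict.getD d i [] <;> simp
  rw [← hfilters]
  set pos := d.keys.filter (fun i => decide (0 < (PySem.Dict.getD d i []).length)) with hposdef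
  have hsize : PySem.Dict.size d = d.keys.length := by
    simp [PySem.Dict.size, PySem.Dict.keys]
  cases hpos : pos with
  | nil => exact absurd hpos hne
  | cons u t =>
    have hupos : u ∈ pos := hpos ▸ List.mem_cons_self
    have huk : u ∈ d.keys := List.mem_of_mem_filter hupos
    have hndk : d.keys.Nodup := PySem.Dict.nodup_keys_ofList graph
    have hreach : ∀ v, Relation.ReflTransGen (pvStep d) u v → v ∈ d.keys := by
      refine pre2_reach d u hndk huk ?_
      have : pos.headD 0 = u := by rw [hpos]; rfl
      rwa [this] at hpre2
    have hAmem := bfs_char d u hreach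
    have hBmem := sat_char d u hndk hreach
    have hAn : (pvBFS d [u] PySem.Set.empty).Nodup :=
      bfs_nodup d [u] PySem.Set.empty (by simp [PySem.Set.empty])
    have hBn : (pvFold (pvExpand d) d.keys.length [u]).Nodup := sat_nodup d d.keys.length u
    have hperm : (pvBFS d [u] PySem.Set.empty).Perm (pvFold (pvExpand d) d.keys.length [u]) := by
      rw [List.perm_ext_iff_of_nodup hAn hBn]
      intro a
      rw [hAmem a, hBmem a]
    have hlen : (pvBFS d [u] PySem.Set.empty).length = (pvFold (pvExpand d) d.keys.length [u]).length :=
      hperm.length_eq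
    have hs0 : PySem.Set.add PySem.Set.empty u = [u] := rfl
    have hiterdef : (List.range (PySem.Dict.size d)).foldl (fun s _ => pvExpand d s) [u]
        = pvFold (pvExpand d) d.keys.length [u] := by
      rw [hsize]; rfl
    show (if (pvBFS d [u] PySem.Set.empty).length = (u :: t).length then true else false)
      = decide (PySem.Set.len (List.foldl (fun s _ => pvExpand d s) (PySem.Set.add PySem.Set.empty u) (List.range (PySem.Dict.size d))) = ((u :: t).length : Int))
    rw [hs0, hiterdef, hlen]
    have hlenint : PySem.Set.len (pvFold (pvExpand d) d.keys.length [u])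
        = ((pvFold (pvExpand d) d.keys.length [u]).length : Int) := rfl
    rw [hlenint]
    by_cases h : (pvFold (pvExpand d) d.keys.length [u]).length = (u :: t).length
    · simp [h]
    · simp only [h, if_neg, not_false_iff]
      have h2 : ¬ ((pvFold (pvExpand d) d.keys.length [u]).length : Int) = (t.length : Int) + 1 := by
        simp only [List.length_cons] at h
        exact_mod_cast h
      simp [h2]
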